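-- pv_equiv track=rewrite | github.com/99blakeD99/fscompliance | fscompliance/query/processing.py | _get_temporal_context
-- ===== SOURCE A (Python) =====
-- from typing import Any, Dict, List, Optional, Set, Tuple, Union
--
-- def _get_temporal_context(temporal_refs: List[str]) -> Dict[str, Any]:
--     """Get contextual information for temporal references."""
--
--     context = {
--         "time_horizon": "unknown",
--         "urgency": "medium",
--         "periodicity": None
--     }
--
--     for ref in temporal_refs:
--         ref_lower = ref.lower()
--
--         if any(word in ref_lower for word in ["immediate", "urgent", "asap"]):
--             context["urgency"] = "high"
--         elif any(word in ref_lower for word in ["annual", "quarterly", "monthly"]):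
--             context["periodicity"] = ref_lower
--         elif any(word in ref_lower for word in ["day", "week"]):
--             context["time_horizon"] = "short_term"
--         elif any(word in ref_lower for word in ["month", "quarter"]):
--             context["time_horizon"] = "medium_term"
--         elif any(word in ref_lower for word in ["year", "annual"]):
--             context["time_horizon"] = "long_term"
--
--     return context
-- ===== SOURCE B (Python) =====
-- def _classify(ref):
--     """Map one reference to its (field, value) effect, or None if it has none."""
--     rl = ref.lower()
--     if any(w in rl for w in ("immediate", "urgent", "asap")):
--         return ("urgency", "high")
--     if any(w in rl for w in ("annual", "quarterly", "monthly")):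
--         return ("periodicity", rl)
--     if any(w in rl for w in ("day", "week")):
--         return ("time_horizon", "short_term")
--     if any(w in rl for w in ("month", "quarter")):
--         return ("time_horizon", "medium_term")
--     if any(w in rl for w in ("year", "annual")):
--         return ("time_horizon", "long_term")
--     return None
--
-- def _last_value(tagged, key, default):
--     """Value of the last effect targeting `key` (last write wins), else default."""
--     for t in reversed(tagged):
--         if t is not None and t[0] == key:
--             return t[1]
--     return default
--
-- def _get_temporal_context(temporal_refs):
--     """Get contextual information for temporal references."""
--     tagged = [_classify(r) for r in temporal_refs]
--     return {
--         "time_horizon": _last_value(tagged, "time_horizon", "unknown"),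
--         "urgency": _last_value(tagged, "urgency", "medium"),
--         "periodicity": _last_value(tagged, "periodicity", None),
--     }
-- ===== Notes on version B (the rewrite author's own statement) =====
-- stated objective: alternative
-- what changed: Instead of a single pass mutating a context dict, B classifies each reference once into an optional (field, value) effect and then computes each of the three result fields independently by a last-match search over the reversed effect list.
import Mathlib
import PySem

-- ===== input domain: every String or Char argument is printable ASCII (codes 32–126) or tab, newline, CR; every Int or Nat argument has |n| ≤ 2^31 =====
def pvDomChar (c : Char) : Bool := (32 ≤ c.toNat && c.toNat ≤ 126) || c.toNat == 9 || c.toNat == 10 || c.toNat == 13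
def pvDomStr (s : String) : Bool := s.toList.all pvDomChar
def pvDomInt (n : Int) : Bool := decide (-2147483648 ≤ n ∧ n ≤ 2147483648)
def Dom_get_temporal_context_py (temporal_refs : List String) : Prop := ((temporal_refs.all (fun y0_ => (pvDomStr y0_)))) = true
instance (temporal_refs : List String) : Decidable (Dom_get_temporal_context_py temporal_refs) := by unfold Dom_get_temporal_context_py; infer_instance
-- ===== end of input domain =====

-- B replaces A's single pass that mutates a context dict by staged passes: classify each
-- reference once into an optional (field, value) effect, then build each of the three
-- result fields independently by a last-match (reverse) search (objective: alternative).

-- ===== PORT A =====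
-- one iteration of A's for-loop body: the if/elif chain updating the context dict
def pvStepA (context : PySem.Dict String (Option String)) (ref : String) :
    PySem.Dict String (Option String) :=
  let ref_lower := PySem.Str.lower ref
  if (["immediate", "urgent", "asap"].any (fun word => PySem.Str.isIn word ref_lower)) then
    context.insert "urgency" (some "high")
  else if (["annual", "quarterly", "monthly"].any (fun word => PySem.Str.isIn word ref_lower)) then
    context.insert "periodicity" (some ref_lower)
  else if (["day", "week"].any (fun word => PySem.Str.isIn word ref_lower)) then
    context.insert "time_horizon" (some "short_term")
  else if (["month", "quarter"].any (fun word => PySem.Str.isIn word ref_lower)) then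
    context.insert "time_horizon" (some "medium_term")
  else if (["year", "annual"].any (fun word => PySem.Str.isIn word ref_lower)) then
    context.insert "time_horizon" (some "long_term")
  else
    context

def get_temporal_context_py (temporal_refs : List String) : List (String × Option String) :=
  let context : PySem.Dict String (Option String) :=
    PySem.Dict.ofList [("time_horizon", some "unknown"), ("urgency", some "medium"), ("periodicity", none)]
  (temporal_refs.foldl pvStepA context).items

-- ===== PORT B =====
-- _classify: map one reference to its optional (field, value) effect
def pvClassify (ref : String) : Option (String × String) :=
  let rl := PySem.Str.lower ref
  if (["immediate", "urgent", "asap"].any (fun w => PySem.Str.isIn w rl)) then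
    some ("urgency", "high")
  else if (["annual", "quarterly", "monthly"].any (fun w => PySem.Str.isIn w rl)) then
    some ("periodicity", rl)
  else if (["day", "week"].any (fun w => PySem.Str.isIn w rl)) then
    some ("time_horizon", "short_term")
  else if (["month", "quarter"].any (fun w => PySem.Str.isIn w rl)) then
    some ("time_horizon", "medium_term")
  else if (["year", "annual"].any (fun w => PySem.Str.isIn w rl)) then
    some ("time_horizon", "long_term")
  else
    none

-- _last_value's loop over reversed(tagged)
def pvLastAux (l : List (Option (String × String))) (key : String) (default : Option String) :
    Option String :=
  match l with
  | [] => default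
  | t :: rest =>
    match t with
    | some (k, v) => if k == key then some v else pvLastAux rest key default
    | none => pvLastAux rest key default

-- _last_value(tagged, key, default)
def pvLastValue (tagged : List (Option (String × String))) (key : String)
    (default : Option String) : Option String :=
  pvLastAux tagged.reverse key default

def get_temporal_context_py_alt (temporal_refs : List String) : List (String × Option String) :=
  let tagged := temporal_refs.map pvClassify
  [("time_horizon", pvLastValue tagged "time_horizon" (some "unknown")),
   ("urgency", pvLastValue tagged "urgency" (some "medium")),
   ("periodicity", pvLastValue tagged "periodicity" none)]

-- ===== PRECONDITION & SPEC =====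
def Spec_get_temporal_context_py (temporal_refs : List String) (out : List (String × Option String)) : Prop := out = get_temporal_context_py_alt temporal_refs
instance (temporal_refs : List String) (out : List (String × Option String)) : Decidable (Spec_get_temporal_context_py temporal_refs out) := by unfold Spec_get_temporal_context_py; infer_instance

-- ===== CLAIM (what is proved, stated in full; the proofs are below) =====
def Claim_equal_get_temporal_context_py : Prop := ∀ (temporal_refs : List String), Dom_get_temporal_context_py temporal_refs → Spec_get_temporal_context_py temporal_refs (get_temporal_context_py temporal_refs)

-- ===== LEMMAS AND PROOFS =====
-- the effect of one list element on a reverse last-match search, seen from the front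
def pvStepD (t : Option (String × String)) (key : String) (d : Option String) : Option String :=
  match t with
  | some (k, v) => if k == key then some v else d
  | none => d

theorem pvLastAux_append (l : List (Option (String × String))) (t : Option (String × String))
    (key : String) (d : Option String) :
    pvLastAux (l ++ [t]) key d = pvLastAux l key (pvStepD t key d) := by
  induction l with
  | nil => cases t with
    | none => rfl
    | some p => rcases p with ⟨k, v⟩; simp [pvLastAux, pvStepD]
  | cons h l ih => cases h with
    | none => simpa [pvLastAux] using ih
    | some p => rcases p with ⟨k, v⟩; simp [pvLastAux, ih]

-- loop invariant: A's fold over a 3-key context equals B's three reverse searches,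
-- with the current field values as defaults
theorem pvMain (refs : List String) (th u p : Option String) :
    (refs.foldl pvStepA
      (PySem.Dict.ofList [("time_horizon", th), ("urgency", u), ("periodicity", p)])).items
    = [("time_horizon", pvLastAux (refs.map pvClassify).reverse "time_horizon" th),
       ("urgency", pvLastAux (refs.map pvClassify).reverse "urgency" u),
       ("periodicity", pvLastAux (refs.map pvClassify).reverse "periodicity" p)] := by
  induction refs generalizing th u p with
  | nil => rfl
  | cons r rest ih =>
    simp only [List.foldl_cons, List.map_cons, List.reverse_cons,
      pvLastAux_append, pvStepA, pvClassify]
    split_ifs with h1 h2 h3 h4 h5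
    · exact ih th (some "high") p
    · exact ih th u (some (PySem.Str.lower r))
    · exact ih (some "short_term") u p
    · exact ih (some "medium_term") u p
    · exact ih (some "long_term") u p
    · exact ih th u p

-- ===== VERDICT (by name: the statement is the Claim_ definition above) =====
theorem get_temporal_context_py_spec : Claim_equal_get_temporal_context_py := by
  intro refs _
  unfold Spec_get_temporal_context_py get_temporal_context_py get_temporal_context_py_alt pvLastValue
  exact pvMain refs (some "unknown") (some "medium") none
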